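-- pv_equiv track=rewrite | github.com/TheGamerCant/Modern-Day-Sandbox | __code/idea_generator/sat_algorithm.py | generate_routes
-- ===== SOURCE A (Python) =====
-- def generate_routes(nodes):
--     id_to_prereq = {nid: [set(g) for g in prereqs if g] for nid, prereqs, _ in nodes}
--     id_to_excl   = {nid: set(excl) for nid, _, excl in nodes}
--     node_ids = [nid for nid, _, _ in nodes]
--
--     def backtrack(route_list, route_set):
--         yield route_list[:]
--
--         for nid in node_ids:
--             if nid in route_set:
--                 continue
--             if route_set & id_to_excl[nid]:  # exclusivity conflict
--                 continue
--             if any(len(g & route_set) == 0 for g in id_to_prereq[nid]):  # unmet prereq group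
--                 continue
--
--             route_list.append(nid)
--             route_set.add(nid)
--             yield from backtrack(route_list, route_set)
--             route_list.pop()
--             route_set.remove(nid)
--
--     return list(backtrack([], set()))
-- ===== SOURCE B (Python) =====
-- def generate_routes(nodes):
--     id_to_prereq = {nid: [set(g) for g in prereqs if g] for nid, prereqs, _ in nodes}
--     id_to_excl   = {nid: set(excl) for nid, _, excl in nodes}
--     node_ids = [nid for nid, _, _ in nodes]
--
--     def admissible(nid, route_set):
--         return (nid not in route_set
--                 and not (route_set & id_to_excl[nid])
--                 and all(g & route_set for g in id_to_prereq[nid]))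
--
--     out = []
--     stack = [([], set())]
--     while stack:
--         route_list, route_set = stack.pop()
--         out.append(route_list)
--         children = [nid for nid in node_ids if admissible(nid, route_set)]
--         for nid in reversed(children):
--             stack.append((route_list + [nid], route_set | {nid}))
--     return out
-- ===== Notes on version B (the rewrite author's own statement) =====
-- stated objective: alternative
-- what changed: The recursive generator backtrack is replaced by an iterative DFS over an explicit stack of (route_list, route_set) states: pop a state, emit its route, and push the admissible extensions in reverse order so the pre-order output sequence is identical.
import Mathlib
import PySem

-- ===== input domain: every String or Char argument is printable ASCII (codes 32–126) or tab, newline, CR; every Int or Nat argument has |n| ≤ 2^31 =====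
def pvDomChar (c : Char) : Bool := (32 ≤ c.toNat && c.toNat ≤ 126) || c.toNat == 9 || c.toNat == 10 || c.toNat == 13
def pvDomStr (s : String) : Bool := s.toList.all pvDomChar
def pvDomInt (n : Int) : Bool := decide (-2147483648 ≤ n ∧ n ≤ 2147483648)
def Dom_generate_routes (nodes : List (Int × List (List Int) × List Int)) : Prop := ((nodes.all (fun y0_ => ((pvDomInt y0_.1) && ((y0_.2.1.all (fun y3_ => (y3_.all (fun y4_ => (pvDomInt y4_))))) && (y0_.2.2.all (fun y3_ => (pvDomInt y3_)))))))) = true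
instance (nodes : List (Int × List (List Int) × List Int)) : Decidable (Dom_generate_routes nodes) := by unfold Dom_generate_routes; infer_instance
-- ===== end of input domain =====

-- B replaces the recursive generator by an iterative DFS over an explicit stack of
-- (route_list, route_set) states, pushing admissible extensions in reverse order so the
-- pre-order output sequence is identical (objective: alternative decomposition).


-- ===== PORT A =====
-- the two dict comprehensions and node_ids list (identical lines in Source A and Source B)
def pvPrereqDict (nodes : List (Int × List (List Int) × List Int)) : PySem.Dict Int (List (PySem.Set Int)) :=
  nodes.foldl (fun d y => d.insert y.1 ((y.2.1.filter (fun g => !g.isEmpty)).map PySem.Set.ofList)) PySem.Dict.empty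

def pvExclDict (nodes : List (Int × List (List Int) × List Int)) : PySem.Dict Int (PySem.Set Int) :=
  nodes.foldl (fun d y => d.insert y.1 (PySem.Set.ofList y.2.2)) PySem.Dict.empty

-- A's recursive generator `backtrack`; the Nat argument is fuel, a totality guard only:
-- the recursion depth is bounded by the number of distinct node ids (proved below), so the
-- initial fuel nodes.length + 1 is never exhausted.
def pvBacktrack (pre : PySem.Dict Int (List (PySem.Set Int))) (exc : PySem.Dict Int (PySem.Set Int))
    (ids : List Int) : Nat → List Int → PySem.Set Int → List (List Int)
  | 0, _, _ => []
  | f+1, rl, rs =>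
    rl :: ids.foldl (fun acc nid =>
      if PySem.Set.contains rs nid then acc
      else if !(PySem.Set.inter rs (exc.getD nid [])).isEmpty then acc
      else if (pre.getD nid []).any (fun g => PySem.Set.len (PySem.Set.inter g rs) == 0) then acc
      else acc ++ pvBacktrack pre exc ids f (rl ++ [nid]) (PySem.Set.add rs nid)) []

def generate_routes (nodes : List (Int × List (List Int) × List Int)) : List (List Int) :=
  pvBacktrack (pvPrereqDict nodes) (pvExclDict nodes) (nodes.map (·.1))
    ((nodes.map (·.1)).length + 1) [] []

-- ===== PORT B =====
-- Source B's helper `admissible(nid, route_set)`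
def pvAdmissible (pre : PySem.Dict Int (List (PySem.Set Int))) (exc : PySem.Dict Int (PySem.Set Int))
    (rs : PySem.Set Int) (nid : Int) : Bool :=
  !(PySem.Set.contains rs nid)
    && (PySem.Set.inter rs (exc.getD nid [])).isEmpty
    && (pre.getD nid []).all (fun g => !(PySem.Set.inter g rs).isEmpty)

-- fuel bound for the stack loop: pvTfuel n k bounds the number of stack pops generated by a
-- state that can still grow by k distinct ids, with at most n children per state
def pvTfuel (n : Nat) : Nat → Nat
  | 0 => 1
  | k+1 => 1 + n * pvTfuel n k

-- Source B's while-loop; head of the list = top of the stack, so pushing reversed(children)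
-- prepends children in forward order.  The Nat argument is fuel (totality guard only).
def pvDfsLoop (pre : PySem.Dict Int (List (PySem.Set Int))) (exc : PySem.Dict Int (PySem.Set Int))
    (ids : List Int) : Nat → List (List Int × PySem.Set Int) → List (List Int)
  | _, [] => []
  | 0, _ :: _ => []
  | f+1, (rl, rs) :: rest =>
    let children := ids.filter (pvAdmissible pre exc rs)
    rl :: pvDfsLoop pre exc ids f
      (children.map (fun nid => (rl ++ [nid], PySem.Set.union rs [nid])) ++ rest)

def generate_routes_alt (nodes : List (Int × List (List Int) × List Int)) : List (List Int) :=
  pvDfsLoop (pvPrereqDict nodes) (pvExclDict nodes) (nodes.map (·.1))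
    (pvTfuel (nodes.map (·.1)).length (nodes.map (·.1)).length) [([], PySem.Set.empty)]

-- ===== PRECONDITION & SPEC =====
def Spec_generate_routes (nodes : List (Int × List (List Int) × List Int)) (out : List (List Int)) : Prop := out = generate_routes_alt nodes
instance (nodes : List (Int × List (List Int) × List Int)) (out : List (List Int)) : Decidable (Spec_generate_routes nodes out) := by unfold Spec_generate_routes; infer_instance

-- ===== CLAIM (what is proved, stated in full; the proofs are below) =====
def Claim_equal_generate_routes : Prop := ∀ (nodes : List (Int × List (List Int) × List Int)), Dom_generate_routes nodes → Spec_generate_routes nodes (generate_routes nodes)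

-- ===== LEMMAS AND PROOFS =====

-- 1 ≤ pvTfuel n k
lemma pvTfuel_pos (n k : Nat) : 1 ≤ pvTfuel n k := by
  cases k <;> simp [pvTfuel]

lemma pvTfuel_mono (n : Nat) {k m : Nat} (h : k ≤ m) : pvTfuel n k ≤ pvTfuel n m := by
  induction m with
  | zero => have : k = 0 := Nat.le_zero.1 h; simp [this]
  | succ m ih =>
    rcases Nat.lt_or_ge k (m+1) with hk | hk
    · calc pvTfuel n k ≤ pvTfuel n m := ih (by omega)
        _ ≤ 1 + n * pvTfuel n m := by
            rcases Nat.eq_zero_or_pos n with h0 | h0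
            · subst h0; cases m <;> simp [pvTfuel]
            · have := Nat.le_mul_of_pos_left (pvTfuel n m) h0; omega
        _ = pvTfuel n (m+1) := rfl
    · have : k = m + 1 := by omega
      subst this; exact le_rfl

-- a Nodup subset of ids has at most (ofList ids).length elements
lemma pvCard_le (ids : List Int) (rs : PySem.Set Int) (hnd : rs.Nodup)
    (hsub : ∀ x ∈ rs, x ∈ ids) : rs.length ≤ (PySem.Set.ofList ids).length := by
  have : rs ⊆ PySem.Set.ofList ids := fun x hx => (PySem.Set.mem_ofList ids x).2 (hsub x hx)
  exact (hnd.subperm this).length_le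

-- A's guarded foldl body is the filtered flatMap over B's admissibility test
lemma pvFlatMap_if {α β : Type} (p : α → Bool) (F : α → List β) (l : List α) :
    l.flatMap (fun x => if p x then F x else []) = (l.filter p).flatMap F := by
  induction l with
  | nil => rfl
  | cons x xs ih =>
    rw [List.flatMap_cons, List.filter_cons]
    by_cases h : p x
    · simp [h, ih]
    · simp [h, ih]

lemma pvLen_eq_zero (s : PySem.Set Int) : (PySem.Set.len s == 0) = s.isEmpty := by
  cases s
  · simp [PySem.Set.len]
  · simp [PySem.Set.len]; omega

lemma pvFold_eq (pre : PySem.Dict Int (List (PySem.Set Int))) (exc : PySem.Dict Int (PySem.Set Int))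
    (ids : List Int) (rs : PySem.Set Int) (F : Int → List (List Int)) :
    ids.foldl (fun acc nid =>
      if PySem.Set.contains rs nid then acc
      else if !(PySem.Set.inter rs (exc.getD nid [])).isEmpty then acc
      else if (pre.getD nid []).any (fun g => PySem.Set.len (PySem.Set.inter g rs) == 0) then acc
      else acc ++ F nid) []
    = (ids.filter (pvAdmissible pre exc rs)).flatMap F := by
  rw [PySem.List.foldl_congr_mem
    (g := fun acc nid => acc ++ (if pvAdmissible pre exc rs nid then F nid else []))]
  · rw [PySem.List.foldl_append_eq_flatMap, pvFlatMap_if]; simp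
  · intro acc nid _
    have h3 : ((pre.getD nid []).any (fun g => PySem.Set.len (PySem.Set.inter g rs) == 0))
        = !((pre.getD nid []).all (fun g => !(PySem.Set.inter g rs).isEmpty)) := by
      rw [List.all_eq_not_any_not]
      simp only [Bool.not_not]
      congr 1
      funext g
      exact pvLen_eq_zero _
    simp only [h3]
    by_cases h1 : nid ∈ rs <;>
      cases h2 : (PySem.Set.inter rs (exc.getD nid [])).isEmpty <;>
        cases h4 : (pre.getD nid []).all (fun g => !(PySem.Set.inter g rs).isEmpty) <;>
          simp [pvAdmissible, h1, h2, h4]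

lemma pvBacktrack_succ (pre : PySem.Dict Int (List (PySem.Set Int))) (exc : PySem.Dict Int (PySem.Set Int))
    (ids : List Int) (f : Nat) (rl : List Int) (rs : PySem.Set Int) :
    pvBacktrack pre exc ids (f+1) rl rs
      = rl :: (ids.filter (pvAdmissible pre exc rs)).flatMap
          (fun nid => pvBacktrack pre exc ids f (rl ++ [nid]) (PySem.Set.add rs nid)) := by
  show rl :: _ = _
  rw [pvFold_eq]

-- admissible nid ⇒ nid ∉ rs
lemma pvAdmissible_not_mem (pre : PySem.Dict Int (List (PySem.Set Int))) (exc : PySem.Dict Int (PySem.Set Int))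
    (rs : PySem.Set Int) (nid : Int) (h : pvAdmissible pre exc rs nid = true) : nid ∉ rs := by
  unfold pvAdmissible at h
  simp only [Bool.and_eq_true, Bool.not_eq_true'] at h
  intro hm
  have hc : PySem.Set.contains rs nid = true := (PySem.Set.contains_iff rs nid).2 hm
  rw [h.1.1] at hc
  exact Bool.false_ne_true hc

-- the result of A's backtrack does not depend on the fuel, as long as it is sufficient
lemma pvBacktrack_fuel (pre : PySem.Dict Int (List (PySem.Set Int))) (exc : PySem.Dict Int (PySem.Set Int))
    (ids : List Int) :
    ∀ f1 f2 (rl : List Int) (rs : PySem.Set Int), rs.Nodup → (∀ x ∈ rs, x ∈ ids) →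
    (PySem.Set.ofList ids).length + 1 ≤ f1 + rs.length →
    (PySem.Set.ofList ids).length + 1 ≤ f2 + rs.length →
    pvBacktrack pre exc ids f1 rl rs = pvBacktrack pre exc ids f2 rl rs := by
  intro f1
  induction f1 with
  | zero =>
    intro f2 rl rs hnd hsub h1 _
    exact absurd (pvCard_le ids rs hnd hsub) (by omega)
  | succ a ih =>
    intro f2 rl rs hnd hsub h1 h2
    cases f2 with
    | zero => exact absurd (pvCard_le ids rs hnd hsub) (by omega)
    | succ b =>
      rw [pvBacktrack_succ, pvBacktrack_succ]
      congr 1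
      apply List.flatMap_congr
      intro nid hnid
      rw [List.mem_filter] at hnid
      have hnm : nid ∉ rs := pvAdmissible_not_mem pre exc rs nid hnid.2
      have hadd : PySem.Set.add rs nid = rs ++ [nid] := PySem.Set.add_of_not_mem hnm
      apply ih
      · exact PySem.Set.nodup_add rs nid hnd
      · intro x hx
        rcases (PySem.Set.mem_add rs nid x).1 hx with hx | hx
        · exact hsub x hx
        · subst hx; exact hnid.1
      · rw [hadd]; simp; omega
      · rw [hadd]; simp; omega

-- the main bridge: the stack loop computes the concatenation of A's backtracks of the
-- stacked states (with the canonical fuel), provided the loop fuel covers the total work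
lemma pvLoop_eq (pre : PySem.Dict Int (List (PySem.Set Int))) (exc : PySem.Dict Int (PySem.Set Int))
    (ids : List Int) :
    ∀ f (st : List (List Int × PySem.Set Int)),
    (∀ e ∈ st, e.2.Nodup ∧ ∀ x ∈ e.2, x ∈ ids) →
    (st.map (fun e => pvTfuel ids.length ((PySem.Set.ofList ids).length - e.2.length))).sum ≤ f →
    pvDfsLoop pre exc ids f st
      = st.flatMap (fun e =>
          pvBacktrack pre exc ids ((PySem.Set.ofList ids).length + 1 - e.2.length) e.1 e.2) := by
  intro f
  induction f with
  | zero =>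
    intro st hinv hsum
    cases st with
    | nil => rfl
    | cons e rest =>
      exfalso
      have := pvTfuel_pos ids.length ((PySem.Set.ofList ids).length - e.2.length)
      simp [List.map_cons, List.sum_cons] at hsum
      omega
  | succ f ih =>
    intro st hinv hsum
    cases st with
    | nil => rfl
    | cons e rest =>
      obtain ⟨rl, rs⟩ := e
      have hinv0 := hinv (rl, rs) (by simp)
      have hcard : rs.length ≤ (PySem.Set.ofList ids).length :=
        pvCard_le ids rs hinv0.1 hinv0.2
      show rl :: pvDfsLoop pre exc ids f _ = _
      set D := (PySem.Set.ofList ids).length with hD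
      set children := ids.filter (pvAdmissible pre exc rs) with hch
      set st' := children.map (fun nid => (rl ++ [nid], PySem.Set.union rs [nid])) ++ rest with hst'
      have hunion : ∀ nid : Int, PySem.Set.union rs [nid] = PySem.Set.add rs nid := by
        intro nid; rfl
      -- length of an admissible child's set
      have hchlen : ∀ nid ∈ children, (PySem.Set.add rs nid).length = rs.length + 1 := by
        intro nid hnid
        rw [hch, List.mem_filter] at hnid
        rw [PySem.Set.add_of_not_mem (pvAdmissible_not_mem pre exc rs nid hnid.2)]
        simp
      -- invariant for the new stack
      have hinv' : ∀ e ∈ st', e.2.Nodup ∧ ∀ x ∈ e.2, x ∈ ids := by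
        intro e he
        rw [hst', List.mem_append] at he
        rcases he with he | he
        · rw [List.mem_map] at he
          obtain ⟨nid, hnid, rfl⟩ := he
          rw [hch, List.mem_filter] at hnid
          refine ⟨?_, ?_⟩
          · rw [hunion]; exact PySem.Set.nodup_add rs nid hinv0.1
          · intro x hx
            rw [hunion] at hx
            rcases (PySem.Set.mem_add rs nid x).1 hx with hx | hx
            · exact hinv0.2 x hx
            · subst hx; exact hnid.1
        · exact hinv (e) (by simp [he])
      -- fuel bound for the new stack
      have hsum' :
          (st'.map (fun e => pvTfuel ids.length (D - e.2.length))).sum ≤ f := by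
        simp only [List.map_cons, List.sum_cons] at hsum
        rw [hst']
        simp only [List.map_append, List.sum_append, List.map_map]
        by_cases hfull : rs.length = D
        · -- no admissible children when the set already holds every distinct id
          have hperm : rs.Perm (PySem.Set.ofList ids) := by
            apply (hinv0.1.subperm
              (fun x hx => (PySem.Set.mem_ofList ids x).2 (hinv0.2 x hx))).perm_of_length_le
            rw [← hD, ← hfull]
          have hempty : children = [] := by
            rw [hch, List.filter_eq_nil_iff]
            intro nid hnid hadm
            exact pvAdmissible_not_mem pre exc rs nid hadm
              (hperm.mem_iff.2 ((PySem.Set.mem_ofList ids nid).2 hnid))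
          rw [hempty]
          have := pvTfuel_pos ids.length (D - rs.length)
          simp
          omega
        · have hlt : rs.length < D := by omega
          obtain ⟨k, hk⟩ : ∃ k, D - rs.length = k + 1 := ⟨D - rs.length - 1, by omega⟩
          rw [hk] at hsum
          simp only [pvTfuel] at hsum
          have hchsum :
              ((children.map (fun nid =>
                pvTfuel ids.length (D - (PySem.Set.union rs [nid]).length))).sum)
                ≤ ids.length * pvTfuel ids.length k := by
            have heach : ∀ nid ∈ children,
                pvTfuel ids.length (D - (PySem.Set.union rs [nid]).length)
                  = pvTfuel ids.length k := by
              intro nid hnid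
              rw [hunion, hchlen nid hnid]
              congr 1
              omega
            calc (children.map (fun nid =>
                    pvTfuel ids.length (D - (PySem.Set.union rs [nid]).length))).sum
                = (children.map (fun _ => pvTfuel ids.length k)).sum := by
                  congr 1; exact List.map_congr_left heach
              _ = children.length * pvTfuel ids.length k := by
                  rw [List.map_const']; simp [List.sum_replicate, smul_eq_mul]
              _ ≤ ids.length * pvTfuel ids.length k := by
                  have : children.length ≤ ids.length := by
                    rw [hch]; exact List.length_filter_le _ _
                  exact Nat.mul_le_mul_right _ this
          have : ((children.map (fun x =>
              pvTfuel ids.length (D - (PySem.Set.union rs [x]).length))).sum) +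
              ((rest.map (fun e => pvTfuel ids.length (D - e.2.length))).sum) ≤ f := by
            omega
          simpa using this
      -- apply the induction hypothesis and fold the A-side back one step
      rw [ih st' hinv' hsum']
      have hfuel : D + 1 - rs.length = (D - rs.length) + 1 := by omega
      rw [hst', List.flatMap_append, List.flatMap_map]
      simp only [List.flatMap_cons]
      rw [hfuel, pvBacktrack_succ, ← hch, List.cons_append]
      congr 1
      congr 1
      apply List.flatMap_congr
      intro nid hnid
      simp only [hunion]
      congr 1
      rw [hchlen nid hnid]
      omega
-- ===== VERDICT (by name: the statement is the Claim_ definition above) =====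
theorem generate_routes_spec : Claim_equal_generate_routes := by
  intro nodes _
  unfold Spec_generate_routes generate_routes generate_routes_alt
  set pre := pvPrereqDict nodes
  set exc := pvExclDict nodes
  set ids := nodes.map (·.1) with hids
  set D := (PySem.Set.ofList ids).length with hD
  have hDn : D ≤ ids.length := PySem.Set.length_ofList_le ids
  rw [pvLoop_eq pre exc ids (pvTfuel ids.length ids.length) [([], PySem.Set.empty)]
    (by intro e he; simp at he; subst he; exact ⟨List.nodup_nil, by simp⟩)
    (by simpa using pvTfuel_mono ids.length hDn)]
  simp only [List.flatMap_cons, List.flatMap_nil, List.append_nil]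
  exact pvBacktrack_fuel pre exc ids (ids.length + 1) (D + 1 - 0) [] []
    List.nodup_nil (by simp) (by simp; omega) (by simp; omega)
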